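-- pv_equiv track=rewrite | github.com/nazirite96/pythonStudy | level_primary/왼쪽_오른쪽.py | solution
-- ===== SOURCE A (Python) =====
-- def solution(str_list):
--     answer = []
--
--     for i,char in enumerate(str_list):
--         if char == 'l':
--             answer = str_list[:i]
--             break
--         elif char == 'r':
--             answer = str_list[i+1:]
--             break
--     return answer
-- ===== SOURCE B (Python) =====
-- def solution(str_list):
--     n = len(str_list)
--     li = str_list.index('l') if 'l' in str_list else n
--     ri = str_list.index('r') if 'r' in str_list else n
--     if li == n and ri == n:
--         return []
--     if li < ri:
--         return str_list[:li]
--     return str_list[ri + 1:]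
-- ===== Notes on version B (the rewrite author's own statement) =====
-- stated objective: alternative
-- what changed: Replaces A's single fused enumerate-scan-with-break by two independent first-occurrence lookups ('l' and 'r') with a length sentinel, then a single comparison decides which slice to return.
import Mathlib
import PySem

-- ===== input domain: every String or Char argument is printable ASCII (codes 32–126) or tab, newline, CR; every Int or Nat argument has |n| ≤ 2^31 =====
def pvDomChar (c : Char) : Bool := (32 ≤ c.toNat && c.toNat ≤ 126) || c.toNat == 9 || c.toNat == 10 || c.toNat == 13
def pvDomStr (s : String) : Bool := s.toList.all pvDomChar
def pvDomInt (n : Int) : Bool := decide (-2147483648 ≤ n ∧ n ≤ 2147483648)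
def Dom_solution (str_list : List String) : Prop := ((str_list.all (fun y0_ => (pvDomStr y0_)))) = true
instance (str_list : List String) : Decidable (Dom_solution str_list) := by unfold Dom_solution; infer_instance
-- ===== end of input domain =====

-- B replaces A's fused scan-with-break by two independent first-occurrence lookups and one comparison; same return value.

-- ===== PORT A =====
-- the for-loop with break: i is the enumerate counter, rest the remaining elements
def solutionLoop (orig : List String) (i : Nat) : List String → List String
  | [] => []
  | c :: cs =>
      if c = "l" then PySem.List.slice orig none (some (i : Int))
      else if c = "r" then PySem.List.slice orig (some ((i : Int) + 1)) none
      else solutionLoop orig (i + 1) cs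

def solution (str_list : List String) : List String :=
  solutionLoop str_list 0 str_list

-- ===== PORT B =====
def solution_alt (str_list : List String) : List String :=
  let n := str_list.length
  let li := match PySem.List.index? str_list "l" with | some k => k | none => n
  let ri := match PySem.List.index? str_list "r" with | some k => k | none => n
  if li = n ∧ ri = n then []
  else if li < ri then PySem.List.slice str_list none (some (li : Int))
  else PySem.List.slice str_list (some ((ri : Int) + 1)) none

-- ===== PRECONDITION & SPEC =====
def Spec_solution (str_list : List String) (out : List String) : Prop := out = solution_alt str_list
instance (str_list : List String) (out : List String) : Decidable (Spec_solution str_list out) := by unfold Spec_solution; infer_instance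

-- ===== CLAIM (what is proved, stated in full; the proofs are below) =====
def Claim_equal_solution : Prop := ∀ (str_list : List String), Dom_solution str_list → Spec_solution str_list (solution str_list)

-- ===== LEMMAS AND PROOFS =====

-- first occurrence of "l" or "r": which one and where
def firstLR : List String → Option (Bool × Nat)
  | [] => none
  | c :: cs =>
      if c = "l" then some (true, 0)
      else if c = "r" then some (false, 0)
      else (firstLR cs).map (fun p => (p.1, p.2 + 1))

lemma solutionLoop_eq (rest : List String) : ∀ (pre : List String),
    solutionLoop (pre ++ rest) pre.length rest =
      match firstLR rest with
      | none => []
      | some (true, k) => (pre ++ rest).take (pre.length + k)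
      | some (false, k) => (pre ++ rest).drop (pre.length + k + 1) := by
  induction rest with
  | nil => intro pre; simp [solutionLoop, firstLR]
  | cons c cs ih =>
    intro pre
    by_cases hl : c = "l"
    · simp [solutionLoop, firstLR, hl, PySem.List.slice_to_natCast]
    · by_cases hr : c = "r"
      · subst hr
        simp only [solutionLoop, firstLR, hl, if_false, reduceIte]
        rw [show ((pre.length : Int) + 1) = ((pre.length + 1 : Nat) : Int) by push_cast; ring,
            PySem.List.slice_from_natCast]
      · have h1 : pre ++ c :: cs = (pre ++ [c]) ++ cs := by simp
        have h2 : pre.length + 1 = (pre ++ [c]).length := by simp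
        simp only [solutionLoop, hl, hr, if_false, h1, h2, ih (pre ++ [c])]
        cases hf : firstLR cs with
        | none => simp [firstLR, hl, hr, hf]
        | some p =>
          obtain ⟨b, k⟩ := p
          cases b <;> simp [firstLR, hl, hr, hf] <;>
            · congr 1
              omega

lemma firstLR_none {l : List String} (h : firstLR l = none) : "l" ∉ l ∧ "r" ∉ l := by
  induction l with
  | nil => simp
  | cons c cs ih =>
    simp only [firstLR] at h
    split_ifs at h with hl hr
    simp only [Option.map_eq_none_iff] at h
    obtain ⟨h1, h2⟩ := ih h
    refine ⟨?_, ?_⟩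
    · intro hmem
      rcases List.mem_cons.mp hmem with hc | hc
      · exact hl hc.symm
      · exact h1 hc
    · intro hmem
      rcases List.mem_cons.mp hmem with hc | hc
      · exact hr hc.symm
      · exact h2 hc

lemma firstLR_some (l : List String) : ∀ (b : Bool) (k : Nat), firstLR l = some (b, k) →
    (if b then PySem.List.index? l "l" = some k ∧ ∀ j, PySem.List.index? l "r" = some j → k < j
     else PySem.List.index? l "r" = some k ∧ ∀ j, PySem.List.index? l "l" = some j → k < j) := by
  induction l with
  | nil => intro b k h; simp [firstLR] at h
  | cons c cs ih =>
    intro b k h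
    simp only [firstLR] at h
    split_ifs at h with hl hr
    · cases h
      subst hl
      simp only [if_true]
      refine ⟨PySem.List.index?_cons_self _ _, ?_⟩
      intro j hj
      rw [PySem.List.index?_cons_of_ne cs (show ("l" : String) ≠ "r" by decide)] at hj
      rcases Option.map_eq_some_iff.mp hj with ⟨j', _, rfl⟩
      omega
    · cases h
      subst hr
      simp only [Bool.false_eq_true, if_false]
      refine ⟨PySem.List.index?_cons_self _ _, ?_⟩
      intro j hj
      rw [PySem.List.index?_cons_of_ne cs (show ("r" : String) ≠ "l" by decide)] at hj
      rcases Option.map_eq_some_iff.mp hj with ⟨j', _, rfl⟩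
      omega
    · rcases Option.map_eq_some_iff.mp h with ⟨⟨b', k'⟩, hf, hbk⟩
      simp only [Prod.mk.injEq] at hbk
      obtain ⟨rfl, rfl⟩ := hbk
      have hih := ih b' k' hf
      cases b' <;> simp only [if_true, Bool.false_eq_true, if_false] at hih ⊢
      · refine ⟨?_, ?_⟩
        · rw [PySem.List.index?_cons_of_ne cs hr, hih.1]; rfl
        · intro j hj
          rw [PySem.List.index?_cons_of_ne cs hl] at hj
          rcases Option.map_eq_some_iff.mp hj with ⟨j', hj', rfl⟩
          have := hih.2 j' hj'; omega
      · refine ⟨?_, ?_⟩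
        · rw [PySem.List.index?_cons_of_ne cs hl, hih.1]; rfl
        · intro j hj
          rw [PySem.List.index?_cons_of_ne cs hr] at hj
          rcases Option.map_eq_some_iff.mp hj with ⟨j', hj', rfl⟩
          have := hih.2 j' hj'; omega

lemma index?_lt_length {l : List String} {v : String} {k : Nat}
    (h : PySem.List.index? l v = some k) : k < l.length := by
  rcases PySem.List.getElem_of_index?_eq_some h with ⟨hk, _, _⟩
  exact hk

-- ===== VERDICT (by name: the statement is the Claim_ definition above) =====
theorem solution_spec : Claim_equal_solution := by
  intro l _
  show solution l = solution_alt l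
  have hA := solutionLoop_eq l []
  simp only [List.nil_append, List.length_nil, Nat.zero_add] at hA
  show solutionLoop l 0 l = _
  rw [hA]
  simp only [solution_alt]
  cases hf : firstLR l with
  | none =>
    obtain ⟨hl, hr⟩ := firstLR_none hf
    rw [← PySem.List.index?_eq_none_iff] at hl hr
    rw [PySem.List.index?_eq_idxOf?] at hl hr
    simp [hl, hr]
  | some p =>
    obtain ⟨b, k⟩ := p
    have hs := firstLR_some l b k hf
    cases b
    · simp only [Bool.false_eq_true, if_false] at hs
      obtain ⟨hr, hlt⟩ := hs
      have hklen := index?_lt_length hr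
      rw [PySem.List.index?_eq_idxOf?] at hr
      cases hl : List.idxOf? "l" l with
      | none =>
        simp [hl, hr]
        rw [if_neg (by omega), if_neg (by omega),
            show ((k : Int) + 1) = ((k + 1 : Nat) : Int) by push_cast; ring,
            PySem.List.slice_from_natCast]
      | some j =>
        have hj := hlt j (by rw [PySem.List.index?_eq_idxOf?]; exact hl)
        simp [hl, hr]
        rw [if_neg (by omega), if_neg (by omega),
            show ((k : Int) + 1) = ((k + 1 : Nat) : Int) by push_cast; ring,
            PySem.List.slice_from_natCast]
    · simp only [if_true] at hs
      obtain ⟨hl, hlt⟩ := hs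
      have hklen := index?_lt_length hl
      rw [PySem.List.index?_eq_idxOf?] at hl
      cases hr : List.idxOf? "r" l with
      | none =>
        simp [hl, hr]
        rw [if_neg (by omega), if_pos (by omega)]
      | some j =>
        have hj := hlt j (by rw [PySem.List.index?_eq_idxOf?]; exact hr)
        simp [hl, hr]
        rw [if_neg (by omega), if_pos (by omega)]
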